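-- pv_equiv track=rewrite | github.com/zwomack1/asdasdasd | creative_system.py | _identify_semantic_patterns
-- ===== SOURCE A (Python) =====
-- from typing import Dict, List, Any, Optional, Union, Tuple
--
-- def _identify_semantic_patterns(text: str) -> List[str]:
--     """Identify semantic patterns in text"""
--
--     patterns = []
--     text_lower = text.lower()
--
--     # Check for problem-solution patterns
--     if 'problem' in text_lower and 'solution' in text_lower:
--         patterns.append('problem_solution')
--
--     # Check for cause-effect patterns
--     if any(word in text_lower for word in ['because', 'therefore', 'consequently']):
--         patterns.append('cause_effect')
--
--     # Check for comparison patterns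
--     if any(word in text_lower for word in ['compared', 'versus', 'similar', 'different']):
--         patterns.append('comparison')
--
--     return patterns
-- ===== SOURCE B (Python) =====
-- # Different algorithm: instead of running a separate substring search for each
-- # keyword, scan the lowercased text once left-to-right and at each position
-- # record every keyword that starts there (a multi-pattern scan); the three
-- # patterns are then derived from the set of keywords found.
-- _KEYWORDS = ['problem', 'solution', 'because', 'therefore', 'consequently',
--              'compared', 'versus', 'similar', 'different']
--
-- def _identify_semantic_patterns(text: str):
--     t = text.lower()
--     found = set()
--     for i in range(len(t)):
--         for w in _KEYWORDS:
--             if t.startswith(w, i):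
--                 found.add(w)
--     patterns = []
--     if 'problem' in found and 'solution' in found:
--         patterns.append('problem_solution')
--     if 'because' in found or 'therefore' in found or 'consequently' in found:
--         patterns.append('cause_effect')
--     if 'compared' in found or 'versus' in found or 'similar' in found or 'different' in found:
--         patterns.append('comparison')
--     return patterns
-- ===== Notes on version B (the rewrite author's own statement) =====
-- stated objective: alternative
-- what changed: Replaces the nine independent substring searches with a single left-to-right scan of the text that records which keywords start at each position into a set, from which the three patterns are then derived.
import Mathlib
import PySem

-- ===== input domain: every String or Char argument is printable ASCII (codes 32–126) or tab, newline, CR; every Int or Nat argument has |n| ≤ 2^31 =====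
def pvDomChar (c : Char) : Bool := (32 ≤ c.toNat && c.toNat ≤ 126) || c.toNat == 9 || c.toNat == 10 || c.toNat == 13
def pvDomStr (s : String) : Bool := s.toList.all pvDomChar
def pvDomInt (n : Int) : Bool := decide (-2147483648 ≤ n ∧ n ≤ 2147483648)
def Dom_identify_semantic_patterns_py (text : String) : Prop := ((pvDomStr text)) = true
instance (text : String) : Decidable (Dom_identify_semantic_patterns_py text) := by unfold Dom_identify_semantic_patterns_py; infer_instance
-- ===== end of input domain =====

-- B replaces A's nine independent substring searches with one left-to-right positional
-- scan of the text collecting the keywords found into a set (alternative; same cost).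

-- ===== PORT A =====
def identify_semantic_patterns_py (text : String) : List String :=
  let patterns : List String := []
  let text_lower := PySem.Str.lower text
  let patterns := if (PySem.Str.isIn "problem" text_lower && PySem.Str.isIn "solution" text_lower) = true
    then patterns ++ ["problem_solution"] else patterns
  let patterns := if (["because", "therefore", "consequently"].any fun w => PySem.Str.isIn w text_lower) = true
    then patterns ++ ["cause_effect"] else patterns
  let patterns := if (["compared", "versus", "similar", "different"].any fun w => PySem.Str.isIn w text_lower) = true
    then patterns ++ ["comparison"] else patterns
  patterns

-- ===== PORT B =====
def pvKeywords : List String :=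
  ["problem", "solution", "because", "therefore", "consequently",
   "compared", "versus", "similar", "different"]

def identify_semantic_patterns_py_alt (text : String) : List String :=
  let t := (PySem.Str.lower text).toList
  -- one positional scan: at each index i record every keyword starting there
  let found : PySem.Set String :=
    (List.range t.length).foldl (fun acc i =>
      pvKeywords.foldl (fun acc w =>
        if PySem.Chars.startswith (t.drop i) w.toList then PySem.Set.add acc w else acc) acc)
      PySem.Set.empty
  let patterns : List String := []
  let patterns := if (PySem.Set.contains found "problem" && PySem.Set.contains found "solution") = true
    then patterns ++ ["problem_solution"] else patterns
  let patterns := if (PySem.Set.contains found "because" || PySem.Set.contains found "therefore" || PySem.Set.contains found "consequently") = true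
    then patterns ++ ["cause_effect"] else patterns
  let patterns := if (PySem.Set.contains found "compared" || PySem.Set.contains found "versus" || PySem.Set.contains found "similar" || PySem.Set.contains found "different") = true
    then patterns ++ ["comparison"] else patterns
  patterns

-- ===== PRECONDITION & SPEC =====
def Spec_identify_semantic_patterns_py (text : String) (out : List String) : Prop := out = identify_semantic_patterns_py_alt text
instance (text : String) (out : List String) : Decidable (Spec_identify_semantic_patterns_py text out) := by unfold Spec_identify_semantic_patterns_py; infer_instance

-- ===== CLAIM (what is proved, stated in full; the proofs are below) =====
def Claim_equal_identify_semantic_patterns_py : Prop := ∀ (text : String), Dom_identify_semantic_patterns_py text → Spec_identify_semantic_patterns_py text (identify_semantic_patterns_py text)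

-- ===== LEMMAS AND PROOFS =====

-- membership after the inner fold over the keyword list
theorem pv_mem_inner (s : List Char) (ks : List String) (acc : PySem.Set String) (x : String) :
    x ∈ ks.foldl (fun acc w =>
        if PySem.Chars.startswith s w.toList then PySem.Set.add acc w else acc) acc ↔
      x ∈ acc ∨ (x ∈ ks ∧ PySem.Chars.startswith s x.toList = true) := by
  induction ks generalizing acc with
  | nil => simp
  | cons k ks ih =>
    simp only [List.foldl_cons]
    by_cases h : PySem.Chars.startswith s k.toList = true
    · rw [if_pos h, ih]
      simp only [PySem.Set.mem_add, List.mem_cons]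
      constructor
      · rintro ((hx | rfl) | ⟨hk, hs⟩)
        · exact Or.inl hx
        · exact Or.inr ⟨Or.inl rfl, h⟩
        · exact Or.inr ⟨Or.inr hk, hs⟩
      · rintro (hx | ⟨rfl | hk, hs⟩)
        · exact Or.inl (Or.inl hx)
        · exact Or.inl (Or.inr rfl)
        · exact Or.inr ⟨hk, hs⟩
    · rw [if_neg h, ih]
      simp only [List.mem_cons]
      constructor
      · rintro (hx | ⟨hk, hs⟩)
        · exact Or.inl hx
        · exact Or.inr ⟨Or.inr hk, hs⟩
      · rintro (hx | ⟨rfl | hk, hs⟩)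
        · exact Or.inl hx
        · exact absurd hs h
        · exact Or.inr ⟨hk, hs⟩

-- membership after the outer fold over all positions
theorem pv_mem_outer (t : List Char) (n : ℕ) (acc : PySem.Set String) (x : String) :
    x ∈ (List.range n).foldl (fun acc i =>
        pvKeywords.foldl (fun acc w =>
          if PySem.Chars.startswith (t.drop i) w.toList then PySem.Set.add acc w else acc) acc) acc ↔
      x ∈ acc ∨ (x ∈ pvKeywords ∧ ∃ i < n, PySem.Chars.startswith (t.drop i) x.toList = true) := by
  induction n generalizing acc with
  | zero => simp
  | succ n ih =>
    rw [List.range_succ, List.foldl_append, List.foldl_cons, List.foldl_nil, pv_mem_inner, ih]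
    constructor
    · rintro ((hx | ⟨hk, i, hi, hs⟩) | ⟨hk, hs⟩)
      · exact Or.inl hx
      · exact Or.inr ⟨hk, i, Nat.lt_succ_of_lt hi, hs⟩
      · exact Or.inr ⟨hk, n, Nat.lt_succ_self n, hs⟩
    · rintro (hx | ⟨hk, i, hi, hs⟩)
      · exact Or.inl (Or.inl hx)
      · rcases Nat.lt_succ_iff_lt_or_eq.mp hi with hi | rfl
        · exact Or.inl (Or.inr ⟨hk, i, hi, hs⟩)
        · exact Or.inr ⟨hk, hs⟩

-- for a nonempty keyword, occurrence at some scanned position = Python's 'w in t'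
theorem pv_scan_iff_isIn (t : List Char) (w : List Char) (hw : w ≠ []) :
    (∃ i < t.length, PySem.Chars.startswith (t.drop i) w = true) ↔
      PySem.Chars.isIn w t = true := by
  rw [← PySem.Chars.exists_prefix_drop_iff_isIn]
  constructor
  · rintro ⟨i, _, hs⟩
    exact ⟨i, (PySem.Chars.startswith_iff _ _).mp hs⟩
  · rintro ⟨j, hp⟩
    by_cases hj : j < t.length
    · exact ⟨j, hj, (PySem.Chars.startswith_iff _ _).mpr hp⟩
    · exfalso
      rw [List.drop_eq_nil_of_le (Nat.le_of_not_lt hj)] at hp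
      exact hw (List.prefix_nil.mp hp)

-- for each keyword, the scan's set answers exactly the substring test
theorem pv_contains_found (t : List Char) (w : String)
    (hk : w ∈ pvKeywords) (hw : w.toList ≠ []) :
    PySem.Set.contains
      ((List.range t.length).foldl (fun acc i =>
        pvKeywords.foldl (fun acc w =>
          if PySem.Chars.startswith (t.drop i) w.toList
          then PySem.Set.add acc w else acc) acc) PySem.Set.empty) w
      = PySem.Chars.isIn w.toList t := by
  rcases hb : PySem.Chars.isIn w.toList t with _ | _
  · rw [← Bool.not_eq_true, PySem.Set.contains_iff, pv_mem_outer]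
    rintro (hx | ⟨_, i, hi, hs⟩)
    · simp [PySem.Set.empty] at hx
    · have := (pv_scan_iff_isIn t w.toList hw).mp ⟨i, hi, hs⟩
      rw [hb] at this; exact Bool.false_ne_true this
  · rw [PySem.Set.contains_iff, pv_mem_outer]
    exact Or.inr ⟨hk, (pv_scan_iff_isIn t w.toList hw).mpr hb⟩

-- ===== VERDICT (by name: the statement is the Claim_ definition above) =====
theorem identify_semantic_patterns_py_spec : Claim_equal_identify_semantic_patterns_py := by
  intro text _
  unfold Spec_identify_semantic_patterns_py identify_semantic_patterns_py identify_semantic_patterns_py_alt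
  simp only [PySem.Str.isIn_eq, PySem.Str.toList_lower]
  rw [pv_contains_found _ "problem" (by decide) (by decide),
      pv_contains_found _ "solution" (by decide) (by decide),
      pv_contains_found _ "because" (by decide) (by decide),
      pv_contains_found _ "therefore" (by decide) (by decide),
      pv_contains_found _ "consequently" (by decide) (by decide),
      pv_contains_found _ "compared" (by decide) (by decide),
      pv_contains_found _ "versus" (by decide) (by decide),
      pv_contains_found _ "similar" (by decide) (by decide),
      pv_contains_found _ "different" (by decide) (by decide)]
  simp [List.any_cons, Bool.or_assoc]
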